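-- pv_equiv track=rewrite | github.com/alirafiqmalik/LogicTune | src/logictune/verifier.py | check_critical_violations
-- ===== SOURCE A (Python) =====
-- from typing import Set, Dict, List, Tuple, Optional
--
-- def check_critical_violations(rules: List[Dict]) -> Dict[str, bool]:
--     """
--     Check for critical safety violations that should fail multiple specs.
--
--     Args:
--         rules: Parsed controller rules
--
--     Returns:
--         Dict mapping violation type to whether it was detected
--     """
--     violations = {
--         'go_on_red': False,
--         'turn_left_on_red': False,
--         'turn_right_on_red_unsafe': False,
--         'speed_through_yellow': False,
--         'ignore_pedestrian': False,
--         'always_go_regardless': False,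
--         'no_red_stop_rule': True,
--         'no_yellow_stop_rule': True,
--         'no_pedestrian_rule': True,
--     }
--
--     for rule in rules:
--         cond = rule.get('condition', '').lower()
--         action = rule.get('action', '').lower()
--         raw = rule.get('raw', '').lower()
--
--         if 'red' in raw and ('stop' in raw or 'wait' in raw):
--             violations['no_red_stop_rule'] = False
--         if 'yellow' in raw and ('stop' in raw or 'slow' in raw or 'prepare' in raw):
--             violations['no_yellow_stop_rule'] = False
--         if 'pedestrian' in raw and ('stop' in raw or 'wait' in raw or 'yield' in raw):
--             violations['no_pedestrian_rule'] = False
--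
--         if 'red' in raw:
--             if 'go straight' in raw or 'proceed' in raw or 'through' in raw:
--                 if 'stop' not in raw and "don't" not in raw and 'do not' not in raw:
--                     violations['go_on_red'] = True
--             if 'turn left' in raw:
--                 if 'stop' not in raw and "don't" not in raw:
--                     violations['turn_left_on_red'] = True
--             if 'turn right' in raw and 'car' in raw:
--                 violations['turn_right_on_red_unsafe'] = True
--
--         if 'yellow' in raw:
--             if 'speed' in raw or 'accelerate' in raw or 'quickly' in raw:
--                 violations['speed_through_yellow'] = True
--             if 'proceed' in raw and 'stop' not in raw and 'slow' not in raw: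
--                 violations['speed_through_yellow'] = True
--
--         if 'pedestrian' in raw:
--             if 'ignore' in raw:
--                 violations['ignore_pedestrian'] = True
--             if 'proceed' in raw and 'stop' not in raw:
--                 violations['ignore_pedestrian'] = True
--
--         if 'regardless' in raw or 'always go' in raw:
--             if 'go' in raw or 'straight' in raw or 'proceed' in raw:
--                 violations['always_go_regardless'] = True
--                 violations['go_on_red'] = True
--                 violations['speed_through_yellow'] = True
--
--     return violations
-- ===== SOURCE B (Python) =====
-- from typing import Dict, List
--
--
-- def _red_stop(raw: str) -> bool:
--     return 'red' in raw and ('stop' in raw or 'wait' in raw)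
--
--
-- def _yellow_stop(raw: str) -> bool:
--     return 'yellow' in raw and ('stop' in raw or 'slow' in raw or 'prepare' in raw)
--
--
-- def _ped_rule(raw: str) -> bool:
--     return 'pedestrian' in raw and ('stop' in raw or 'wait' in raw or 'yield' in raw)
--
--
-- def _go_on_red(raw: str) -> bool:
--     return ('red' in raw
--             and ('go straight' in raw or 'proceed' in raw or 'through' in raw)
--             and 'stop' not in raw and "don't" not in raw and 'do not' not in raw)
--
--
-- def _turn_left_on_red(raw: str) -> bool:
--     return ('red' in raw and 'turn left' in raw
--             and 'stop' not in raw and "don't" not in raw)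
--
--
-- def _turn_right_unsafe(raw: str) -> bool:
--     return 'red' in raw and 'turn right' in raw and 'car' in raw
--
--
-- def _speed_yellow(raw: str) -> bool:
--     return 'yellow' in raw and (
--         'speed' in raw or 'accelerate' in raw or 'quickly' in raw
--         or ('proceed' in raw and 'stop' not in raw and 'slow' not in raw))
--
--
-- def _ignore_ped(raw: str) -> bool:
--     return 'pedestrian' in raw and (
--         'ignore' in raw or ('proceed' in raw and 'stop' not in raw))
--
--
-- def _regardless(raw: str) -> bool:
--     return (('regardless' in raw or 'always go' in raw)
--             and ('go' in raw or 'straight' in raw or 'proceed' in raw))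
--
--
-- def check_critical_violations(rules: List[Dict]) -> Dict[str, bool]:
--     raws = [rule.get('raw', '').lower() for rule in rules]
--     regardless = any(_regardless(r) for r in raws)
--     return {
--         'go_on_red': any(_go_on_red(r) for r in raws) or regardless,
--         'turn_left_on_red': any(_turn_left_on_red(r) for r in raws),
--         'turn_right_on_red_unsafe': any(_turn_right_unsafe(r) for r in raws),
--         'speed_through_yellow': any(_speed_yellow(r) for r in raws) or regardless,
--         'ignore_pedestrian': any(_ignore_ped(r) for r in raws),
--         'always_go_regardless': regardless,
--         'no_red_stop_rule': not any(_red_stop(r) for r in raws),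
--         'no_yellow_stop_rule': not any(_yellow_stop(r) for r in raws),
--         'no_pedestrian_rule': not any(_ped_rule(r) for r in raws),
--     }
-- ===== Notes on version B (the rewrite author's own statement) =====
-- stated objective: alternative
-- what changed: Replaces A's single interleaved loop that mutates a violations dict with independent per-flag computations: per-rule predicates over the lowercased raw string combined by any()/not any(), with the always_go_regardless predicate OR'd into go_on_red and speed_through_yellow.
import Mathlib
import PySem

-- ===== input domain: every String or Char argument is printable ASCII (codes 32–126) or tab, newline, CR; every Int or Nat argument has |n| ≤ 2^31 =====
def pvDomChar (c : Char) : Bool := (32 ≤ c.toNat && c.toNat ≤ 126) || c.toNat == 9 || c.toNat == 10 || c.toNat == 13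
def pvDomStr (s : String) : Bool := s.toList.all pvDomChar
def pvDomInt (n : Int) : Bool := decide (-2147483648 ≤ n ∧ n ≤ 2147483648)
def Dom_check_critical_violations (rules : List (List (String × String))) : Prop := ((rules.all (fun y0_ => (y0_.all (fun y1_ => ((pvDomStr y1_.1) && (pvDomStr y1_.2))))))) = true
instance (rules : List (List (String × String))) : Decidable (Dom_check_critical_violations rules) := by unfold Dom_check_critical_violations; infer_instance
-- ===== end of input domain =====

-- B computes each violation flag independently via per-rule predicates and any/not-any,
-- instead of A's single interleaved loop mutating the dict (objective: alternative decomposition).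

-- ===== PORT A =====
-- A's loop body, block for block ('if red and (stop or wait): ...', etc.); each pvBlk_ is one
-- if-statement of A's Python, applied to the mutable dict in A's order.
def pvBlkRedStop (raw : String) (d : PySem.Dict String Bool) : PySem.Dict String Bool :=
  if PySem.Str.isIn "red" raw && (PySem.Str.isIn "stop" raw || PySem.Str.isIn "wait" raw) then
    d.insert "no_red_stop_rule" false else d

def pvBlkYellowStop (raw : String) (d : PySem.Dict String Bool) : PySem.Dict String Bool :=
  if PySem.Str.isIn "yellow" raw && (PySem.Str.isIn "stop" raw || PySem.Str.isIn "slow" raw || PySem.Str.isIn "prepare" raw) then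
    d.insert "no_yellow_stop_rule" false else d

def pvBlkPedStop (raw : String) (d : PySem.Dict String Bool) : PySem.Dict String Bool :=
  if PySem.Str.isIn "pedestrian" raw && (PySem.Str.isIn "stop" raw || PySem.Str.isIn "wait" raw || PySem.Str.isIn "yield" raw) then
    d.insert "no_pedestrian_rule" false else d

def pvBlkRed (raw : String) (d : PySem.Dict String Bool) : PySem.Dict String Bool :=
  if PySem.Str.isIn "red" raw then
    let d := if PySem.Str.isIn "go straight" raw || PySem.Str.isIn "proceed" raw || PySem.Str.isIn "through" raw then
        (if !PySem.Str.isIn "stop" raw && !PySem.Str.isIn "don't" raw && !PySem.Str.isIn "do not" raw then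
          d.insert "go_on_red" true else d)
      else d
    let d := if PySem.Str.isIn "turn left" raw then
        (if !PySem.Str.isIn "stop" raw && !PySem.Str.isIn "don't" raw then
          d.insert "turn_left_on_red" true else d)
      else d
    if PySem.Str.isIn "turn right" raw && PySem.Str.isIn "car" raw then
      d.insert "turn_right_on_red_unsafe" true else d
  else d

def pvBlkYellow (raw : String) (d : PySem.Dict String Bool) : PySem.Dict String Bool :=
  if PySem.Str.isIn "yellow" raw then
    let d := if PySem.Str.isIn "speed" raw || PySem.Str.isIn "accelerate" raw || PySem.Str.isIn "quickly" raw then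
        d.insert "speed_through_yellow" true else d
    if PySem.Str.isIn "proceed" raw && !PySem.Str.isIn "stop" raw && !PySem.Str.isIn "slow" raw then
      d.insert "speed_through_yellow" true else d
  else d

def pvBlkPed (raw : String) (d : PySem.Dict String Bool) : PySem.Dict String Bool :=
  if PySem.Str.isIn "pedestrian" raw then
    let d := if PySem.Str.isIn "ignore" raw then d.insert "ignore_pedestrian" true else d
    if PySem.Str.isIn "proceed" raw && !PySem.Str.isIn "stop" raw then
      d.insert "ignore_pedestrian" true else d
  else d

def pvBlkRegardless (raw : String) (d : PySem.Dict String Bool) : PySem.Dict String Bool :=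
  if PySem.Str.isIn "regardless" raw || PySem.Str.isIn "always go" raw then
    (if PySem.Str.isIn "go" raw || PySem.Str.isIn "straight" raw || PySem.Str.isIn "proceed" raw then
      ((d.insert "always_go_regardless" true).insert "go_on_red" true).insert "speed_through_yellow" true
    else d)
  else d

-- one iteration of A's for-loop: the seven if-blocks in A's order
def pvStepA (d : PySem.Dict String Bool) (rule : List (String × String)) : PySem.Dict String Bool :=
  let _cond := PySem.Str.lower ((PySem.Dict.mk rule).getD "condition" "")
  let _action := PySem.Str.lower ((PySem.Dict.mk rule).getD "action" "")
  let raw := PySem.Str.lower ((PySem.Dict.mk rule).getD "raw" "")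
  pvBlkRegardless raw (pvBlkPed raw (pvBlkYellow raw (pvBlkRed raw
    (pvBlkPedStop raw (pvBlkYellowStop raw (pvBlkRedStop raw d))))))

def check_critical_violations (rules : List (List (String × String))) : List (String × Bool) :=
  let violations : PySem.Dict String Bool := PySem.Dict.mk
    [("go_on_red", false), ("turn_left_on_red", false), ("turn_right_on_red_unsafe", false),
     ("speed_through_yellow", false), ("ignore_pedestrian", false), ("always_go_regardless", false),
     ("no_red_stop_rule", true), ("no_yellow_stop_rule", true), ("no_pedestrian_rule", true)]
  (rules.foldl pvStepA violations).items

-- ===== PORT B =====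
def pvRedStop (raw : String) : Bool :=
  PySem.Str.isIn "red" raw && (PySem.Str.isIn "stop" raw || PySem.Str.isIn "wait" raw)
def pvYellowStop (raw : String) : Bool :=
  PySem.Str.isIn "yellow" raw && (PySem.Str.isIn "stop" raw || PySem.Str.isIn "slow" raw || PySem.Str.isIn "prepare" raw)
def pvPedRule (raw : String) : Bool :=
  PySem.Str.isIn "pedestrian" raw && (PySem.Str.isIn "stop" raw || PySem.Str.isIn "wait" raw || PySem.Str.isIn "yield" raw)
def pvGoOnRed (raw : String) : Bool :=
  PySem.Str.isIn "red" raw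
    && (PySem.Str.isIn "go straight" raw || PySem.Str.isIn "proceed" raw || PySem.Str.isIn "through" raw)
    && !PySem.Str.isIn "stop" raw && !PySem.Str.isIn "don't" raw && !PySem.Str.isIn "do not" raw
def pvTurnLeftOnRed (raw : String) : Bool :=
  PySem.Str.isIn "red" raw && PySem.Str.isIn "turn left" raw
    && !PySem.Str.isIn "stop" raw && !PySem.Str.isIn "don't" raw
def pvTurnRightUnsafe (raw : String) : Bool :=
  PySem.Str.isIn "red" raw && PySem.Str.isIn "turn right" raw && PySem.Str.isIn "car" raw
def pvSpeedYellow (raw : String) : Bool :=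
  PySem.Str.isIn "yellow" raw
    && (PySem.Str.isIn "speed" raw || PySem.Str.isIn "accelerate" raw || PySem.Str.isIn "quickly" raw
        || (PySem.Str.isIn "proceed" raw && !PySem.Str.isIn "stop" raw && !PySem.Str.isIn "slow" raw))
def pvIgnorePed (raw : String) : Bool :=
  PySem.Str.isIn "pedestrian" raw
    && (PySem.Str.isIn "ignore" raw || (PySem.Str.isIn "proceed" raw && !PySem.Str.isIn "stop" raw))
def pvRegardless (raw : String) : Bool :=
  (PySem.Str.isIn "regardless" raw || PySem.Str.isIn "always go" raw)
    && (PySem.Str.isIn "go" raw || PySem.Str.isIn "straight" raw || PySem.Str.isIn "proceed" raw)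

def check_critical_violations_alt (rules : List (List (String × String))) : List (String × Bool) :=
  let raws := rules.map (fun rule => PySem.Str.lower ((PySem.Dict.mk rule).getD "raw" ""))
  let regardless := raws.any pvRegardless
  [("go_on_red", raws.any pvGoOnRed || regardless),
   ("turn_left_on_red", raws.any pvTurnLeftOnRed),
   ("turn_right_on_red_unsafe", raws.any pvTurnRightUnsafe),
   ("speed_through_yellow", raws.any pvSpeedYellow || regardless),
   ("ignore_pedestrian", raws.any pvIgnorePed),
   ("always_go_regardless", regardless),
   ("no_red_stop_rule", !raws.any pvRedStop),
   ("no_yellow_stop_rule", !raws.any pvYellowStop),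
   ("no_pedestrian_rule", !raws.any pvPedRule)]

-- ===== PRECONDITION & SPEC =====
def Spec_check_critical_violations (rules : List (List (String × String))) (out : List (String × Bool)) : Prop := out = check_critical_violations_alt rules
instance (rules : List (List (String × String))) (out : List (String × Bool)) : Decidable (Spec_check_critical_violations rules out) := by unfold Spec_check_critical_violations; infer_instance

-- ===== CLAIM (what is proved, stated in full; the proofs are below) =====
def Claim_equal_check_critical_violations : Prop := ∀ (rules : List (List (String × String))), Dom_check_critical_violations rules → Spec_check_critical_violations rules (check_critical_violations rules)

-- ===== LEMMAS AND PROOFS =====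
-- the shape of A's dict throughout the loop, as a function of the nine flag values
def pvMk9 (b1 b2 b3 b4 b5 b6 b7 b8 b9 : Bool) : PySem.Dict String Bool :=
  PySem.Dict.mk
    [("go_on_red", b1), ("turn_left_on_red", b2), ("turn_right_on_red_unsafe", b3),
     ("speed_through_yellow", b4), ("ignore_pedestrian", b5), ("always_go_regardless", b6),
     ("no_red_stop_rule", b7), ("no_yellow_stop_rule", b8), ("no_pedestrian_rule", b9)]

theorem pvBlkRedStop_mk9 (raw : String) (b1 b2 b3 b4 b5 b6 b7 b8 b9 : Bool) :
    pvBlkRedStop raw (pvMk9 b1 b2 b3 b4 b5 b6 b7 b8 b9) =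
      pvMk9 b1 b2 b3 b4 b5 b6 (b7 && !pvRedStop raw) b8 b9 := by
  simp only [pvBlkRedStop, pvRedStop]
  split_ifs <;> (simp_all [pvMk9, PySem.Dict.insert]) <;> (intros; simp only [← Bool.not_eq_true] at *; tauto)

theorem pvBlkYellowStop_mk9 (raw : String) (b1 b2 b3 b4 b5 b6 b7 b8 b9 : Bool) :
    pvBlkYellowStop raw (pvMk9 b1 b2 b3 b4 b5 b6 b7 b8 b9) =
      pvMk9 b1 b2 b3 b4 b5 b6 b7 (b8 && !pvYellowStop raw) b9 := by
  simp only [pvBlkYellowStop, pvYellowStop]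
  split_ifs <;> (simp_all [pvMk9, PySem.Dict.insert]) <;> (intros; simp only [← Bool.not_eq_true] at *; tauto)

theorem pvBlkPedStop_mk9 (raw : String) (b1 b2 b3 b4 b5 b6 b7 b8 b9 : Bool) :
    pvBlkPedStop raw (pvMk9 b1 b2 b3 b4 b5 b6 b7 b8 b9) =
      pvMk9 b1 b2 b3 b4 b5 b6 b7 b8 (b9 && !pvPedRule raw) := by
  simp only [pvBlkPedStop, pvPedRule]
  split_ifs <;> (simp_all [pvMk9, PySem.Dict.insert]) <;> (intros; simp only [← Bool.not_eq_true] at *; tauto)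

theorem pvBlkRed_mk9 (raw : String) (b1 b2 b3 b4 b5 b6 b7 b8 b9 : Bool) :
    pvBlkRed raw (pvMk9 b1 b2 b3 b4 b5 b6 b7 b8 b9) =
      pvMk9 (b1 || pvGoOnRed raw) (b2 || pvTurnLeftOnRed raw) (b3 || pvTurnRightUnsafe raw)
        b4 b5 b6 b7 b8 b9 := by
  simp only [pvBlkRed, pvGoOnRed, pvTurnLeftOnRed, pvTurnRightUnsafe]
  split_ifs <;> simp_all [pvMk9, PySem.Dict.insert]

theorem pvBlkYellow_mk9 (raw : String) (b1 b2 b3 b4 b5 b6 b7 b8 b9 : Bool) :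
    pvBlkYellow raw (pvMk9 b1 b2 b3 b4 b5 b6 b7 b8 b9) =
      pvMk9 b1 b2 b3 (b4 || pvSpeedYellow raw) b5 b6 b7 b8 b9 := by
  simp only [pvBlkYellow, pvSpeedYellow]
  split_ifs <;> simp_all [pvMk9, PySem.Dict.insert]

theorem pvBlkPed_mk9 (raw : String) (b1 b2 b3 b4 b5 b6 b7 b8 b9 : Bool) :
    pvBlkPed raw (pvMk9 b1 b2 b3 b4 b5 b6 b7 b8 b9) =
      pvMk9 b1 b2 b3 b4 (b5 || pvIgnorePed raw) b6 b7 b8 b9 := by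
  simp only [pvBlkPed, pvIgnorePed]
  split_ifs <;> simp_all [pvMk9, PySem.Dict.insert]

theorem pvBlkRegardless_mk9 (raw : String) (b1 b2 b3 b4 b5 b6 b7 b8 b9 : Bool) :
    pvBlkRegardless raw (pvMk9 b1 b2 b3 b4 b5 b6 b7 b8 b9) =
      pvMk9 (b1 || pvRegardless raw) b2 b3 (b4 || pvRegardless raw) b5 (b6 || pvRegardless raw)
        b7 b8 b9 := by
  simp only [pvBlkRegardless, pvRegardless]
  split_ifs <;> simp_all [pvMk9, PySem.Dict.insert]

-- one loop iteration of A updates each flag independently, by exactly B's predicates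
theorem pvStepA_mk9 (b1 b2 b3 b4 b5 b6 b7 b8 b9 : Bool) (rule : List (String × String)) :
    pvStepA (pvMk9 b1 b2 b3 b4 b5 b6 b7 b8 b9) rule =
      (let raw := PySem.Str.lower ((PySem.Dict.mk rule).getD "raw" "")
       pvMk9 ((b1 || pvGoOnRed raw) || pvRegardless raw) (b2 || pvTurnLeftOnRed raw)
             (b3 || pvTurnRightUnsafe raw) ((b4 || pvSpeedYellow raw) || pvRegardless raw)
             (b5 || pvIgnorePed raw) (b6 || pvRegardless raw)
             (b7 && !pvRedStop raw) (b8 && !pvYellowStop raw) (b9 && !pvPedRule raw)) := by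
  simp only [pvStepA, pvBlkRedStop_mk9, pvBlkYellowStop_mk9, pvBlkPedStop_mk9, pvBlkRed_mk9,
    pvBlkYellow_mk9, pvBlkPed_mk9, pvBlkRegardless_mk9]

-- the whole loop, by induction, with B's any-folds appearing as accumulated ors
theorem pvFoldA (rules : List (List (String × String))) (b1 b2 b3 b4 b5 b6 b7 b8 b9 : Bool) :
    rules.foldl pvStepA (pvMk9 b1 b2 b3 b4 b5 b6 b7 b8 b9) =
      (let raws := rules.map (fun rule => PySem.Str.lower ((PySem.Dict.mk rule).getD "raw" ""))
       pvMk9 ((b1 || raws.any pvGoOnRed) || raws.any pvRegardless) (b2 || raws.any pvTurnLeftOnRed)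
             (b3 || raws.any pvTurnRightUnsafe) ((b4 || raws.any pvSpeedYellow) || raws.any pvRegardless)
             (b5 || raws.any pvIgnorePed) (b6 || raws.any pvRegardless)
             (b7 && !raws.any pvRedStop) (b8 && !raws.any pvYellowStop) (b9 && !raws.any pvPedRule)) := by
  induction rules generalizing b1 b2 b3 b4 b5 b6 b7 b8 b9 with
  | nil => simp
  | cons r rs ih =>
    simp only [List.foldl_cons, pvStepA_mk9, List.map_cons, List.any_cons, ih]
    simp only [pvMk9, PySem.Dict.mk.injEq, List.cons.injEq, Prod.mk.injEq, and_true, true_and]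
    refine ⟨?_, ?_, ?_, ?_, ?_, ?_, ?_, ?_, ?_⟩ <;>
      simp [Bool.or_assoc, Bool.or_left_comm, Bool.or_comm, Bool.not_or, Bool.and_assoc]

-- ===== VERDICT (by name: the statement is the Claim_ definition above) =====
theorem check_critical_violations_spec : Claim_equal_check_critical_violations := by
  intro rules _
  show check_critical_violations rules = check_critical_violations_alt rules
  rw [check_critical_violations,
    show (PySem.Dict.mk
      [("go_on_red", false), ("turn_left_on_red", false), ("turn_right_on_red_unsafe", false),
       ("speed_through_yellow", false), ("ignore_pedestrian", false), ("always_go_regardless", false),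
       ("no_red_stop_rule", true), ("no_yellow_stop_rule", true), ("no_pedestrian_rule", true)]) =
      pvMk9 false false false false false false true true true from rfl,
    pvFoldA, check_critical_violations_alt]
  simp [pvMk9]
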